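-- pv_equiv track=rewrite | github.com/RicardoNMFilho/UFAM | Introducao-a-Computacao/Exercicios/Operacoes-sobre-Listas/ricardo2.py | rfinal
-- ===== SOURCE A (Python) =====
-- def rfinal(nfs):
--     def aprovados(x):
--         return [x[y] for y in range(0,len(x)) if x[y][1] >= 5 and x[y][2] >= 75]
--     def repn(x):
--         return [x[y] for y in range(0,len(x)) if x[y][1] < 5 and x[y][2] >= 75]
--     def repp(x):
--         return [x[y] for y in range(0,len(x)) if x[y][1] >= 5 and x[y][2] < 75]
--     def reppn(x):
--         return [x[y] for y in range(0,len(x)) if x[y][1] < 5 and x[y][2] < 75]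
--
--     return (aprovados(nfs), repn(nfs), repp(nfs), reppn(nfs))
-- ===== SOURCE B (Python) =====
-- def rfinal(nfs):
--     aprov, repn, repp, reppn = [], [], [], []
--     for s in nfs:
--         if s[1] >= 5 and s[2] >= 75:
--             aprov.append(s)
--         elif s[2] >= 75:
--             repn.append(s)
--         elif s[1] >= 5:
--             repp.append(s)
--         else:
--             reppn.append(s)
--     return (aprov, repn, repp, reppn)
-- ===== Notes on version B (the rewrite author's own statement) =====
-- stated objective: simpler
-- what changed: One dispatching pass with an if/elif chain routing each student into one of four accumulator lists, replacing four separate index-based comprehension scans of the whole list.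
import Mathlib
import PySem

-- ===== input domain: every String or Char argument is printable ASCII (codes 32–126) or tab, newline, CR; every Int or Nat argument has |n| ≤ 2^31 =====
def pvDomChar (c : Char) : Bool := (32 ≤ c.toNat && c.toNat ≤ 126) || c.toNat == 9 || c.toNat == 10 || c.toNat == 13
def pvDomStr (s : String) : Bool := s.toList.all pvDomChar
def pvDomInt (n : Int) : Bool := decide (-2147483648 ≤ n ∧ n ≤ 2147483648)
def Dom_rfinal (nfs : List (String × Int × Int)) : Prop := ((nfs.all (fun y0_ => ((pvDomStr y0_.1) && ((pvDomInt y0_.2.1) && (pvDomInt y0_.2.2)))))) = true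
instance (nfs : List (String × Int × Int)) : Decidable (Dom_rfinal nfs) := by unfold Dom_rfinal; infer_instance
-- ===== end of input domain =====

-- B replaces A's four whole-list comprehension scans by one pass that routes each
-- student through an if/elif chain into one of four accumulator lists (objective: simpler).

-- ===== PORT A =====
-- Each inner helper is the comprehension [x[y] for y in range(0,len(x)) if <cond on x[y]>];
-- x[y]? is exact here since y ranges over 0..len(x)-1 (no negative/out-of-range index occurs).
def rfinal_aprovados (x : List (String × Int × Int)) : List (String × Int × Int) :=
  (List.range x.length).filterMap (fun y =>
    (x[y]?).bind (fun e => if e.2.1 ≥ 5 ∧ e.2.2 ≥ 75 then some e else none))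

def rfinal_repn (x : List (String × Int × Int)) : List (String × Int × Int) :=
  (List.range x.length).filterMap (fun y =>
    (x[y]?).bind (fun e => if e.2.1 < 5 ∧ e.2.2 ≥ 75 then some e else none))

def rfinal_repp (x : List (String × Int × Int)) : List (String × Int × Int) :=
  (List.range x.length).filterMap (fun y =>
    (x[y]?).bind (fun e => if e.2.1 ≥ 5 ∧ e.2.2 < 75 then some e else none))

def rfinal_reppn (x : List (String × Int × Int)) : List (String × Int × Int) :=
  (List.range x.length).filterMap (fun y =>
    (x[y]?).bind (fun e => if e.2.1 < 5 ∧ e.2.2 < 75 then some e else none))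

def rfinal (nfs : List (String × Int × Int)) : (List (String × Int × Int)) × (List (String × Int × Int)) × (List (String × Int × Int)) × (List (String × Int × Int)) :=
  (rfinal_aprovados nfs, rfinal_repn nfs, rfinal_repp nfs, rfinal_reppn nfs)

-- ===== PORT B =====
def rfinal_alt (nfs : List (String × Int × Int)) : (List (String × Int × Int)) × (List (String × Int × Int)) × (List (String × Int × Int)) × (List (String × Int × Int)) :=
  nfs.foldl (fun st s =>
    if s.2.1 ≥ 5 ∧ s.2.2 ≥ 75 then (st.1 ++ [s], st.2.1, st.2.2.1, st.2.2.2)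
    else if s.2.2 ≥ 75 then (st.1, st.2.1 ++ [s], st.2.2.1, st.2.2.2)
    else if s.2.1 ≥ 5 then (st.1, st.2.1, st.2.2.1 ++ [s], st.2.2.2)
    else (st.1, st.2.1, st.2.2.1, st.2.2.2 ++ [s])) ([], [], [], [])

-- ===== PRECONDITION & SPEC =====
def Spec_rfinal (nfs : List (String × Int × Int)) (out : (List (String × Int × Int)) × (List (String × Int × Int)) × (List (String × Int × Int)) × (List (String × Int × Int))) : Prop := out = rfinal_alt nfs
instance (nfs : List (String × Int × Int)) (out : (List (String × Int × Int)) × (List (String × Int × Int)) × (List (String × Int × Int)) × (List (String × Int × Int))) : Decidable (Spec_rfinal nfs out) := by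
  unfold Spec_rfinal
  letI h : DecidableEq (List (String × Int × Int)) := inferInstance
  infer_instance

-- ===== CLAIM (what is proved, stated in full; the proofs are below) =====
def Claim_equal_rfinal : Prop := ∀ (nfs : List (String × Int × Int)), Dom_rfinal nfs → Spec_rfinal nfs (rfinal nfs)

-- ===== LEMMAS AND PROOFS =====

-- The index-comprehension over range(len x) is the filter by the element predicate.
theorem pv_pick_eq (p : (String × Int × Int) → Prop) [DecidablePred p]
    (x : List (String × Int × Int)) :
    (List.range x.length).filterMap (fun y =>
      (x[y]?).bind (fun e => if p e then some e else none))
    = x.filter (fun e => decide (p e)) := by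
  induction x with
  | nil => simp
  | cons a l ih =>
    simp only [List.length_cons, List.range_succ_eq_map, List.filterMap_cons,
      List.getElem?_cons_zero, List.filterMap_map, Function.comp, List.getElem?_cons_succ,
      Option.bind_some]
    by_cases h : p a <;> simp [h, ih]

-- Invariant of B's single dispatching pass.
theorem pv_fold_inv (l : List (String × Int × Int))
    (a b c d : List (String × Int × Int)) :
    l.foldl (fun st s =>
      if s.2.1 ≥ 5 ∧ s.2.2 ≥ 75 then (st.1 ++ [s], st.2.1, st.2.2.1, st.2.2.2)
      else if s.2.2 ≥ 75 then (st.1, st.2.1 ++ [s], st.2.2.1, st.2.2.2)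
      else if s.2.1 ≥ 5 then (st.1, st.2.1, st.2.2.1 ++ [s], st.2.2.2)
      else (st.1, st.2.1, st.2.2.1, st.2.2.2 ++ [s])) (a, b, c, d)
    = (a ++ l.filter (fun e => decide (e.2.1 ≥ 5 ∧ e.2.2 ≥ 75)),
       b ++ l.filter (fun e => decide (e.2.1 < 5 ∧ e.2.2 ≥ 75)),
       c ++ l.filter (fun e => decide (e.2.1 ≥ 5 ∧ e.2.2 < 75)),
       d ++ l.filter (fun e => decide (e.2.1 < 5 ∧ e.2.2 < 75))) := by
  induction l generalizing a b c d with
  | nil => simp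
  | cons s t ih =>
    have h1' : (s.2.1 < 5) ↔ ¬ (s.2.1 ≥ 5) := by omega
    have h2' : (s.2.2 < 75) ↔ ¬ (s.2.2 ≥ 75) := by omega
    by_cases h1 : s.2.1 ≥ 5 <;> by_cases h2 : s.2.2 ≥ 75 <;>
      simp [List.foldl_cons, ih, h1, h2, h1', h2']

-- ===== VERDICT (by name: the statement is the Claim_ definition above) =====
theorem rfinal_spec : Claim_equal_rfinal := by
  intro nfs _
  show rfinal nfs = rfinal_alt nfs
  simp only [rfinal, rfinal_alt, rfinal_aprovados, rfinal_repn, rfinal_repp, rfinal_reppn,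
    pv_pick_eq, pv_fold_inv, List.nil_append]
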